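-- pv_equiv track=rewrite | github.com/rmplcu/Tris-AI | tris_ai.py | is_final_state
-- ===== SOURCE A (Python) =====
-- def is_final_state(mat):
--     end = True
--     #more moves?
--     for i in range(3):
--         for j in range(3):
--             if mat[i][j] == 0:
--                 end=False
--
--     #vertical win
--     for i in range(3):
--         if mat[1][i] == mat[2][i] and mat[0][i] == mat[1][i] and mat[0][i] != 0:
--             return True
--
--     #horizontal win
--     for x in mat:
--         if x[0] == x[1] and x[0] == x[2] and x[0] != 0:
--             return True
--
--     #diagonal win
--     if ((mat[0][0] == mat[1][1] and mat[0][0] == mat[2][2]) or (mat[0][2] == mat[1][1] and mat[1][1] == mat[2][0])) and mat[1][1] != 0: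
--         return True
--
--     return end
-- ===== SOURCE B (Python) =====
-- WIN_MASKS = (7, 56, 448, 73, 146, 292, 273, 84)
--
-- def _bitmask(cells, v):
--     # bitmask (bit k set iff cells[k] == v) of the 9 flattened cells
--     m = 0
--     for k, c in enumerate(cells):
--         if c == v:
--             m |= 1 << k
--     return m
--
-- def _wins(m):
--     return any(m & w == w for w in WIN_MASKS)
--
-- def is_final_state(mat):
--     cells = [mat[i][j] for i in range(3) for j in range(3)]
--     # every winning line meets the main diagonal, so only its three values can win
--     for v in (cells[0], cells[4], cells[8]):
--         if v != 0 and _wins(_bitmask(cells, v)):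
--             return True
--     return 0 not in cells
-- ===== Notes on version B (the rewrite author's own statement) =====
-- stated objective: alternative
-- what changed: Instead of testing the 8 lines cell-by-cell, B flattens the board once, prunes winner candidates to the three main-diagonal values (every winning line meets the main diagonal), builds a 9-bit occupancy bitmask per candidate value and tests it for superset against 8 precomputed winning bitmasks; fullness is '0 not in cells'.
-- outside the precondition, e.g. on is_final_state([[1, 2, 1], [2, 1, 2], [2, 1, 0], [2, 2, 2]]): A returns True, B returns False
import Mathlib
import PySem

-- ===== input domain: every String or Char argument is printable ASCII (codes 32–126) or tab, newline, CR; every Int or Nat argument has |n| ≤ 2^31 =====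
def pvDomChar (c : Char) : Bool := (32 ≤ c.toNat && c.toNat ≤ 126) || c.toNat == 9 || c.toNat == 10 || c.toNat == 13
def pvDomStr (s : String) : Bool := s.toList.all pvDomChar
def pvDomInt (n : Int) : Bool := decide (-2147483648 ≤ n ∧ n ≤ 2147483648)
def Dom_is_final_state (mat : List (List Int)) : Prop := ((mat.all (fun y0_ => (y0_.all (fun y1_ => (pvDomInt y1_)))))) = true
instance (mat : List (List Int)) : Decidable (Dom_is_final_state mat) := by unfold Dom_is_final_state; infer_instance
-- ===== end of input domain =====

-- Alternative re-implementation: B flattens the board once, prunes winner candidates to the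
-- three main-diagonal values (every winning line meets the main diagonal) and tests each
-- candidate's 9-bit occupancy bitmask against 8 precomputed winning bitmasks; equal to A on
-- boards of 3 rows with at least 3 cells each (Pre_); return value only, no mutation.


-- mat[i][j]; exact on Pre_ inputs, where every access is in range
def pvCell (mat : List (List Int)) (i j : Int) : Int :=
  (((PySem.List.pyGet? mat i).getD [])|> (fun r => PySem.List.pyGet? r j)).getD 0

-- ===== PORT A =====
def is_final_state (mat : List (List Int)) : Bool :=
  -- end = True; nested loops setting end=False on a zero cell
  let endv := (PySem.List.pyRange 0 3 1).foldl (fun acc i =>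
      (PySem.List.pyRange 0 3 1).foldl (fun acc2 j =>
        if pvCell mat i j == 0 then false else acc2) acc) true
  -- vertical win (early return True)
  if (PySem.List.pyRange 0 3 1).any (fun i =>
      pvCell mat 1 i == pvCell mat 2 i && pvCell mat 0 i == pvCell mat 1 i && pvCell mat 0 i != 0)
  then true
  -- horizontal win: for x in mat
  else if mat.any (fun x =>
      (PySem.List.pyGet? x 0).getD 0 == (PySem.List.pyGet? x 1).getD 0 &&
      (PySem.List.pyGet? x 0).getD 0 == (PySem.List.pyGet? x 2).getD 0 &&
      (PySem.List.pyGet? x 0).getD 0 != 0)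
  then true
  -- diagonal win
  else if ((pvCell mat 0 0 == pvCell mat 1 1 && pvCell mat 0 0 == pvCell mat 2 2) ||
           (pvCell mat 0 2 == pvCell mat 1 1 && pvCell mat 1 1 == pvCell mat 2 0)) &&
          pvCell mat 1 1 != 0
  then true
  else endv

-- ===== PORT B =====
def pvWinMasks : List Int := [7, 56, 448, 73, 146, 292, 273, 84]

-- _bitmask(cells, v): bit k set iff cells[k] == v
def pvBitmask (cells : List Int) (v : Int) : Int :=
  (PySem.List.enumerate cells).foldl
    (fun m kc => if kc.2 == v then PySem.Int.bor m ((1 : Int) <<< kc.1.toNat) else m) 0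

-- _wins(m): any(m & w == w for w in WIN_MASKS)
def pvWins (m : Int) : Bool :=
  pvWinMasks.any (fun w => PySem.Int.band m w == w)

def is_final_state_alt (mat : List (List Int)) : Bool :=
  let cells := (PySem.List.pyRange 0 3 1).flatMap (fun i =>
      (PySem.List.pyRange 0 3 1).map (fun j => pvCell mat i j))
  -- for v in (cells[0], cells[4], cells[8]): if v != 0 and _wins(_bitmask(cells, v)): return True
  if [(PySem.List.pyGet? cells 0).getD 0, (PySem.List.pyGet? cells 4).getD 0,
      (PySem.List.pyGet? cells 8).getD 0].any
       (fun v => v != 0 && pvWins (pvBitmask cells v))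
  then true
  -- return 0 not in cells
  else !(cells.contains 0)

-- ===== PRECONDITION & SPEC =====
-- Pre_: mat has exactly 3 rows of at least 3 cells (both programs read only the 3x3 board,
-- so extra columns are harmless and admitted). This excludes inputs A raises on (missing
-- rows/cells) and matrices with EXTRA ROWS, on which A returns a value but its horizontal
-- loop accidentally scans rows beyond the 3x3 board (see the cite in the claim).
def Pre_is_final_state (mat : List (List Int)) : Prop :=
  mat.length = 3 ∧ ∀ r ∈ mat, 3 ≤ r.length
instance (mat : List (List Int)) : Decidable (Pre_is_final_state mat) := by
  unfold Pre_is_final_state; infer_instance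

def pvWitness_is_final_state : List (List Int) := [[1, 2, 0], [0, 1, 2], [2, 0, 1]]

def Spec_is_final_state (mat : List (List Int)) (out : Bool) : Prop := out = is_final_state_alt mat
instance (mat : List (List Int)) (out : Bool) : Decidable (Spec_is_final_state mat out) := by
  unfold Spec_is_final_state; infer_instance

-- ===== CLAIM (what is proved, stated in full; the proofs are below) =====
def Claim_equal_is_final_state : Prop := ∀ (mat : List (List Int)), Dom_is_final_state mat → Pre_is_final_state mat → Spec_is_final_state mat (is_final_state mat)

-- ===== LEMMAS AND PROOFS =====
theorem pvRow_eval (a b c : Int) (t : List Int) :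
    (PySem.List.pyGet? (a::b::c::t) 0).getD 0 = a ∧
    (PySem.List.pyGet? (a::b::c::t) 1).getD 0 = b ∧
    (PySem.List.pyGet? (a::b::c::t) 2).getD 0 = c := by
  refine ⟨?_, ?_, ?_⟩
  · have h := PySem.List.pyGetD_zero_cons (x := a) (xs := b::c::t) (d := 0)
    simp only [PySem.List.pyGetD] at h
    exact h
  · simpa [PySem.List.pyGetD] using
      PySem.List.pyGetD_eq_getElem (xs := a::b::c::t) (i := 1) (d := 0) (by omega)
        (by simp; omega)
  · simpa [PySem.List.pyGetD] using
      PySem.List.pyGetD_eq_getElem (xs := a::b::c::t) (i := 2) (d := 0) (by omega) (by simp; omega)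

theorem pvCell_eval (a b c d e f g h i : Int) (t0 t1 t2 : List Int) :
    pvCell [a::b::c::t0, d::e::f::t1, g::h::i::t2] 0 0 = a ∧
    pvCell [a::b::c::t0, d::e::f::t1, g::h::i::t2] 0 1 = b ∧
    pvCell [a::b::c::t0, d::e::f::t1, g::h::i::t2] 0 2 = c ∧
    pvCell [a::b::c::t0, d::e::f::t1, g::h::i::t2] 1 0 = d ∧
    pvCell [a::b::c::t0, d::e::f::t1, g::h::i::t2] 1 1 = e ∧
    pvCell [a::b::c::t0, d::e::f::t1, g::h::i::t2] 1 2 = f ∧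
    pvCell [a::b::c::t0, d::e::f::t1, g::h::i::t2] 2 0 = g ∧
    pvCell [a::b::c::t0, d::e::f::t1, g::h::i::t2] 2 1 = h ∧
    pvCell [a::b::c::t0, d::e::f::t1, g::h::i::t2] 2 2 = i := by
  obtain ⟨p0, p1, p2⟩ := pvRow_eval a b c t0
  obtain ⟨q0, q1, q2⟩ := pvRow_eval d e f t1
  obtain ⟨r0, r1, r2⟩ := pvRow_eval g h i t2
  exact ⟨p0, p1, p2, q0, q1, q2, r0, r1, r2⟩

theorem pvRange3 : PySem.List.pyRange 0 3 1 = [0, 1, 2] := rfl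

theorem pv_if_zero (x : Int) (b : Bool) :
    (if x = 0 then false else b) = (decide (x ≠ 0) && b) := by by_cases h : x = 0 <;> simp [h]

theorem pv_ite_prop (p : Prop) [Decidable p] (x : Bool) :
    (if p then true else x) = (decide p || x) := by by_cases h : p <;> simp [h]

theorem pv_beq (x y : Int) : (x == y) = decide (x = y) := by by_cases h : x = y <;> simp [h]

theorem pv_bne (x y : Int) : (x != y) = decide (x ≠ y) := by by_cases h : x = y <;> simp [h]

theorem pvGet9 (a b c d e f g h i : Int) :
    (PySem.List.pyGet? [a,b,c,d,e,f,g,h,i] 0).getD 0 = a ∧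
    (PySem.List.pyGet? [a,b,c,d,e,f,g,h,i] 4).getD 0 = e ∧
    (PySem.List.pyGet? [a,b,c,d,e,f,g,h,i] 8).getD 0 = i := by
  refine ⟨?_, ?_, ?_⟩
  · simpa [PySem.List.pyGetD] using
      PySem.List.pyGetD_eq_getElem (xs := [a,b,c,d,e,f,g,h,i]) (i := 0) (d := 0) (by omega) (by simp)
  · simpa [PySem.List.pyGetD] using
      PySem.List.pyGetD_eq_getElem (xs := [a,b,c,d,e,f,g,h,i]) (i := 4) (d := 0) (by omega) (by simp)
  · simpa [PySem.List.pyGetD] using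
      PySem.List.pyGetD_eq_getElem (xs := [a,b,c,d,e,f,g,h,i]) (i := 8) (d := 0) (by omega) (by simp)

theorem pv_step (m x : Int) (q : Bool) :
    (if q = true then PySem.Int.bor m x else m) = PySem.Int.bor m (if q = true then x else 0) := by
  cases q <;> simp [PySem.Int.bor_zero]

-- the 8 winning-mask subset tests over 9 occupancy bits, evaluated once for all bit patterns
theorem pv_maskAny : ∀ (b0 b1 b2 b3 b4 b5 b6 b7 b8 : Bool),
    ([7, 56, 448, 73, 146, 292, 273, 84] : List Int).any (fun w =>
      PySem.Int.band (PySem.Int.bor (PySem.Int.bor (PySem.Int.bor (PySem.Int.bor (PySem.Int.bor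
        (PySem.Int.bor (PySem.Int.bor (PySem.Int.bor (PySem.Int.bor 0
          (if b0 = true then 1 <<< Int.toNat 0 else 0))
          (if b1 = true then 1 <<< Int.toNat 1 else 0))
          (if b2 = true then 1 <<< Int.toNat 2 else 0))
          (if b3 = true then 1 <<< Int.toNat 3 else 0))
          (if b4 = true then 1 <<< Int.toNat 4 else 0))
          (if b5 = true then 1 <<< Int.toNat 5 else 0))
          (if b6 = true then 1 <<< Int.toNat 6 else 0))
          (if b7 = true then 1 <<< Int.toNat 7 else 0))
          (if b8 = true then 1 <<< Int.toNat 8 else 0)) w == w) =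
    (b0 && b1 && b2 || b3 && b4 && b5 || b6 && b7 && b8 ||
     b0 && b3 && b6 || b1 && b4 && b7 || b2 && b5 && b8 ||
     b0 && b4 && b8 || b2 && b4 && b6) := by decide

-- the bitmask-vs-winning-masks test spelled out on a literal 9-cell list
theorem pvWins_bitmask (v a b c d e f g h i : Int) :
    pvWins (pvBitmask [a,b,c,d,e,f,g,h,i] v) =
      ((a==v) && (b==v) && (c==v) || (d==v) && (e==v) && (f==v) || (g==v) && (h==v) && (i==v) ||
       (a==v) && (d==v) && (g==v) || (b==v) && (e==v) && (h==v) || (c==v) && (f==v) && (i==v) ||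
       (a==v) && (e==v) && (i==v) || (c==v) && (e==v) && (g==v)) := by
  simp only [pvBitmask, pvWins, pvWinMasks, PySem.List.enumerate_cons, PySem.List.enumerate_nil,
    List.foldl, pv_step]
  exact pv_maskAny (a==v) (b==v) (c==v) (d==v) (e==v) (f==v) (g==v) (h==v) (i==v)

theorem pv_main_iff (a b c d e f g h i : Int) :
    (((d = g ∧ a = d) ∧ a ≠ 0 ∨ (e = h ∧ b = e) ∧ b ≠ 0 ∨ (f = i ∧ c = f) ∧ c ≠ 0) ∨ ((a = b ∧ a = c) ∧ a ≠ 0 ∨ (d = e ∧ d = f) ∧ d ≠ 0 ∨ (g = h ∧ g = i) ∧ g ≠ 0) ∨ (a = e ∧ a = i ∨ c = e ∧ e = g) ∧ e ≠ 0 ∨ i ≠ 0 ∧ h ≠ 0 ∧ g ≠ 0 ∧ f ≠ 0 ∧ e ≠ 0 ∧ d ≠ 0 ∧ c ≠ 0 ∧ b ≠ 0 ∧ a ≠ 0) ↔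
    ((a ≠ 0 ∧ ((((((((True ∧ b = a) ∧ c = a ∨ (d = a ∧ e = a) ∧ f = a) ∨ (g = a ∧ h = a) ∧ i = a) ∨ (True ∧ d = a) ∧ g = a) ∨ (b = a ∧ e = a) ∧ h = a) ∨ (c = a ∧ f = a) ∧ i = a) ∨ (True ∧ e = a) ∧ i = a) ∨ (c = a ∧ e = a) ∧ g = a) ∨ e ≠ 0 ∧ ((((((((a = e ∧ b = e) ∧ c = e ∨ (d = e ∧ True) ∧ f = e) ∨ (g = e ∧ h = e) ∧ i = e) ∨ (a = e ∧ d = e) ∧ g = e) ∨ (b = e ∧ True) ∧ h = e) ∨ (c = e ∧ f = e) ∧ i = e) ∨ (a = e ∧ True) ∧ i = e) ∨ (c = e ∧ True) ∧ g = e) ∨ i ≠ 0 ∧ ((((((((a = i ∧ b = i) ∧ c = i ∨ (d = i ∧ e = i) ∧ f = i) ∨ (g = i ∧ h = i) ∧ True) ∨ (a = i ∧ d = i) ∧ g = i) ∨ (b = i ∧ e = i) ∧ h = i) ∨ (c = i ∧ f = i) ∧ True) ∨ (a = i ∧ e = i) ∧ True) ∨ (c = i ∧ e = i) ∧ g = i))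 ∨ ¬(0 = a ∨ 0 = b ∨ 0 = c ∨ 0 = d ∨ 0 = e ∨ 0 = f ∨ 0 = g ∨ 0 = h ∨ 0 = i)) := by
  constructor
  · rintro ((⟨⟨h1, h2⟩, h3⟩ | ⟨⟨h1, h2⟩, h3⟩ | ⟨⟨h1, h2⟩, h3⟩) |
            (⟨⟨h1, h2⟩, h3⟩ | ⟨⟨h1, h2⟩, h3⟩ | ⟨⟨h1, h2⟩, h3⟩) | ⟨h1 | h1, h2⟩ | hf)
    · exact Or.inl (Or.inl ⟨h3, Or.inl (Or.inl (Or.inl (Or.inl (Or.inr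
        ⟨⟨trivial, by omega⟩, by omega⟩))))⟩)
    · exact Or.inl (Or.inr (Or.inl ⟨by omega, Or.inl (Or.inl (Or.inl (Or.inr
        ⟨⟨h2, trivial⟩, by omega⟩)))⟩))
    · exact Or.inl (Or.inr (Or.inr ⟨by omega, Or.inl (Or.inl (Or.inr
        ⟨⟨by omega, h1⟩, trivial⟩))⟩))
    · exact Or.inl (Or.inl ⟨h3, Or.inl (Or.inl (Or.inl (Or.inl (Or.inl (Or.inl (Or.inl
        ⟨⟨trivial, by omega⟩, by omega⟩))))))⟩)
    · exact Or.inl (Or.inr (Or.inl ⟨by omega, Or.inl (Or.inl (Or.inl (Or.inl (Or.inl (Or.inl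
        (Or.inr ⟨⟨h1, trivial⟩, by omega⟩))))))⟩))
    · exact Or.inl (Or.inr (Or.inr ⟨by omega, Or.inl (Or.inl (Or.inl (Or.inl (Or.inl
        (Or.inr ⟨⟨h2, by omega⟩, trivial⟩)))))⟩))
    · exact Or.inl (Or.inr (Or.inl ⟨h2, Or.inl (Or.inr ⟨⟨h1.1, trivial⟩, by omega⟩)⟩))
    · exact Or.inl (Or.inr (Or.inl ⟨h2, Or.inr ⟨⟨h1.1, trivial⟩, by omega⟩⟩))
    · exact Or.inr (by omega)
  · rintro ((⟨h0, hw⟩ | ⟨h0, hw⟩ | ⟨h0, hw⟩) | hf)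
    · rcases hw with ((((((w | w) | w) | w) | w) | w) | w) | w
      · exact Or.inr (Or.inl (Or.inl ⟨⟨by omega, by omega⟩, by omega⟩))
      · exact Or.inr (Or.inl (Or.inr (Or.inl ⟨⟨by omega, by omega⟩, by omega⟩)))
      · exact Or.inr (Or.inl (Or.inr (Or.inr ⟨⟨by omega, by omega⟩, by omega⟩)))
      · exact Or.inl (Or.inl ⟨⟨by omega, by omega⟩, by omega⟩)
      · exact Or.inl (Or.inr (Or.inl ⟨⟨by omega, by omega⟩, by omega⟩))
      · exact Or.inl (Or.inr (Or.inr ⟨⟨by omega, by omega⟩, by omega⟩))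
      · exact Or.inr (Or.inr (Or.inl ⟨Or.inl ⟨by omega, by omega⟩, by omega⟩))
      · exact Or.inr (Or.inr (Or.inl ⟨Or.inr ⟨by omega, by omega⟩, by omega⟩))
    · rcases hw with ((((((w | w) | w) | w) | w) | w) | w) | w
      · exact Or.inr (Or.inl (Or.inl ⟨⟨by omega, by omega⟩, by omega⟩))
      · exact Or.inr (Or.inl (Or.inr (Or.inl ⟨⟨by omega, by omega⟩, by omega⟩)))
      · exact Or.inr (Or.inl (Or.inr (Or.inr ⟨⟨by omega, by omega⟩, by omega⟩)))
      · exact Or.inl (Or.inl ⟨⟨by omega, by omega⟩, by omega⟩)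
      · exact Or.inl (Or.inr (Or.inl ⟨⟨by omega, by omega⟩, by omega⟩))
      · exact Or.inl (Or.inr (Or.inr ⟨⟨by omega, by omega⟩, by omega⟩))
      · exact Or.inr (Or.inr (Or.inl ⟨Or.inl ⟨by omega, by omega⟩, by omega⟩))
      · exact Or.inr (Or.inr (Or.inl ⟨Or.inr ⟨by omega, by omega⟩, by omega⟩))
    · rcases hw with ((((((w | w) | w) | w) | w) | w) | w) | w
      · exact Or.inr (Or.inl (Or.inl ⟨⟨by omega, by omega⟩, by omega⟩))
      · exact Or.inr (Or.inl (Or.inr (Or.inl ⟨⟨by omega, by omega⟩, by omega⟩)))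
      · exact Or.inr (Or.inl (Or.inr (Or.inr ⟨⟨by omega, by omega⟩, by omega⟩)))
      · exact Or.inl (Or.inl ⟨⟨by omega, by omega⟩, by omega⟩)
      · exact Or.inl (Or.inr (Or.inl ⟨⟨by omega, by omega⟩, by omega⟩))
      · exact Or.inl (Or.inr (Or.inr ⟨⟨by omega, by omega⟩, by omega⟩))
      · exact Or.inr (Or.inr (Or.inl ⟨Or.inl ⟨by omega, by omega⟩, by omega⟩))
      · exact Or.inr (Or.inr (Or.inl ⟨Or.inr ⟨by omega, by omega⟩, by omega⟩))
    · exact Or.inr (Or.inr (Or.inr (by omega)))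

-- ===== VERDICT (by name: the statement is the Claim_ definition above) =====
set_option maxHeartbeats 2000000 in
theorem is_final_state_spec : Claim_equal_is_final_state := by
  intro mat _ hpre
  obtain ⟨hlen, hrow⟩ := hpre
  rcases mat with _ | ⟨r0, _ | ⟨r1, _ | ⟨r2, _ | _⟩⟩⟩ <;> simp_all
  have h0 := hrow.1; have h1 := hrow.2.1; have h2 := hrow.2.2
  rcases r0 with _ | ⟨a, _ | ⟨b, _ | ⟨c, t0⟩⟩⟩ <;> simp_all
  rcases r1 with _ | ⟨d, _ | ⟨e, _ | ⟨f, t1⟩⟩⟩ <;> simp_all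
  rcases r2 with _ | ⟨g, _ | ⟨h, _ | ⟨i, t2⟩⟩⟩ <;> simp_all
  show is_final_state _ = is_final_state_alt _
  obtain ⟨e00, e01, e02, e10, e11, e12, e20, e21, e22⟩ := pvCell_eval a b c d e f g h i t0 t1 t2
  obtain ⟨f00, f01, f02⟩ := pvRow_eval a b c t0
  obtain ⟨g00, g01, g02⟩ := pvRow_eval d e f t1
  obtain ⟨k00, k01, k02⟩ := pvRow_eval g h i t2
  simp only [is_final_state, is_final_state_alt, pvRange3,
    List.flatMap_cons, List.flatMap_nil, List.map_cons, List.map_nil, List.append_nil,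
    List.cons_append, List.nil_append]
  obtain ⟨n0, n4, n8⟩ := pvGet9 a b c d e f g h i
  simp only [List.any_cons, List.any_nil, List.foldl]
  simp only [e00, e01, e02, e10, e11, e12, e20, e21, e22,
    f00, f01, f02, g00, g01, g02, k00, k01, k02]
  simp only [n0, n4, n8, pvWins_bitmask]
  simp only [pv_ite_prop, pv_if_zero, Bool.decide_coe,
    List.contains_cons, List.contains_nil, Bool.or_false, pv_beq, pv_bne,
    Bool.and_true, decide_eq_true_eq, ← decide_not, ← Bool.decide_and, ← Bool.decide_or]
  rw [Bool.eq_iff_iff]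
  simp only [Bool.or_eq_true, decide_eq_true_eq]
  exact pv_main_iff a b c d e f g h i
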